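/- GENERATED by farm/mkstatement.py from design/units.tsv (unit `DGifGetScreenDesc.1`) and the assertions of Gif/Spec/Seg_DGifGetScreenDesc.lean — do not edit.
   THE STATEMENT of the proof unit `DGifGetScreenDesc.1`: segment 1 of `DGifGetScreenDesc` (20 instructions; entries 0x1080c6;
   exits 0x10813b,0x1080f7; ranges 0x1080c6-0x1080e4,0x108114-0x10813b)
   takes each of its entry assertions to one of its exit assertions (`Gif.Spec.DGifGetScreenDesc.Seg1`), given the contracts of its callees.
   What the names mean: ProgX/Base/Spec/Basic.lean (the shared hypotheses), Gif/Spec/Seg_DGifGetScreenDesc.lean (the assertions). The theorem to prove: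
   `theorem DGifGetScreenDesc_1_ok : Gif.Spec.DGifGetScreenDesc_1.Statement`. -/
import Gif.Code
import Gif.Dec.All
import Gif.Labels
import Gif.Spec.Reader
import Gif.Spec.Seg_DGifGetScreenDesc
namespace Gif.Spec.DGifGetScreenDesc_1
open X86 X86.User Asan

/-- The statement of unit `DGifGetScreenDesc.1`. -/
def Statement : Prop :=
  ∀ (Lay : Layout) (_hLay : Lay.hi = 0x1000000) (μ : Microarch) (_hμ : UserX.MicroOK μ) (u₀ : State)
    (_hcode : HasCodeNat Lay u₀ Gif.L.DGifGetScreenDesc.entry Gif.Code.code_DGifGetScreenDesc.nat Gif.L.DGifGetScreenDesc.size)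
    (_h_DGifGetWord : ∀ (H : Heap) (rest : List Obj) (frames : List (Nat × FrameLayout)) (F : Forest) (R : Rd), Calls Lay μ ProgX.Base.WayInv (ProgX.Base.conv u₀) Gif.L.DGifGetWord.entry (Gif.Spec.DGifGetWord.spec H rest frames F R))
    (_h_asan_load8_noabort : Asan.SmallCheck Lay μ ProgX.Base.WayInv (ProgX.Base.CodeOK u₀) [.rax, .rcx, .rdx] 8 ProgX.Base.L.__asan_load8_noabort.entry)
    (_h_asan_load4_noabort : Asan.SmallCheck Lay μ ProgX.Base.WayInv (ProgX.Base.CodeOK u₀) [.rax, .rcx, .rdx] 4 ProgX.Base.L.__asan_load4_noabort.entry),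
    Gif.Spec.DGifGetScreenDesc.Seg1 Lay μ u₀

end Gif.Spec.DGifGetScreenDesc_1
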